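-- pv_equiv track=rewrite | github.com/rodrigorochameire-prog/Defender | enrichment-engine/services/radar_extraction_service.py | _normalize_bairro
-- ===== SOURCE A (Python) =====
-- BAIRROS_CAMACARI = [
--     "Abrantes", "Alto da Bela Vista", "Alto do Cruzeiro", "Arembepe",
--     "Barra do Jacuípe", "Buri Satuba", "Caixa d'Água", "Camacari de Dentro",
--     "Camaçari de Dentro", "Caminho da Lagoa", "Campo Limpo", "Catu de Abrantes",
--     "Centro", "Coqueiro de Abrantes", "Dois de Julho", "Estrada do Côco",
--     "Fazenda Mamão", "Gardênia", "Gleba C", "Gleba E", "Gleba H",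
--     "Gravatá", "Guarajuba", "Imbassaí", "Jambeiro",
--     "Jauá", "Km 32", "Lama Preta", "Limoeiro", "Loteamento Parque Verde",
--     "Loteamento Santo Amaro", "Monte Gordo", "Nova Aliança", "Nova Esperança",
--     "Nova Vitória", "Novo Horizonte", "Parafuso", "Parque Florestal",
--     "Parque das Mangabas", "Parque Verde", "Parque Verde II",
--     "Phoc I", "Phoc II", "Phoc III", "Piaçaveira",
--     "Ponto Certo", "Pólo Petroquímico", "Polo Industrial",
--     "Real Park", "Reserva Camassary", "Santo Amaro de Ipitanga",
--     "Santo Antônio", "São Bento", "São Tomé de Paripe",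
--     "Simões Filho", "Stela Mares", "Sucuiu", "Vila Camaçari",
--     "Vila de Abrantes", "Vila Rica",
-- ]
--
-- def _normalize_bairro(bairro: str) -> str:
--     """Normaliza nome de bairro para padronização."""
--     if not bairro:
--         return bairro
--
--     bairro = bairro.strip()
--
--     # Tentar match exato (case-insensitive)
--     for b in BAIRROS_CAMACARI:
--         if b.lower() == bairro.lower():
--             return b
--
--     # Tentar match parcial
--     for b in BAIRROS_CAMACARI:
--         if b.lower() in bairro.lower() or bairro.lower() in b.lower():
--             return b
--
--     return bairro  # Retorna como veio se não encontrar match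
-- ===== SOURCE B (Python) =====
-- BAIRROS_CAMACARI = [
--     "Abrantes", "Alto da Bela Vista", "Alto do Cruzeiro", "Arembepe",
--     "Barra do Jacuípe", "Buri Satuba", "Caixa d'Água", "Camacari de Dentro",
--     "Camaçari de Dentro", "Caminho da Lagoa", "Campo Limpo", "Catu de Abrantes",
--     "Centro", "Coqueiro de Abrantes", "Dois de Julho", "Estrada do Côco",
--     "Fazenda Mamão", "Gardênia", "Gleba C", "Gleba E", "Gleba H",
--     "Gravatá", "Guarajuba", "Imbassaí", "Jambeiro",
--     "Jauá", "Km 32", "Lama Preta", "Limoeiro", "Loteamento Parque Verde",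
--     "Loteamento Santo Amaro", "Monte Gordo", "Nova Aliança", "Nova Esperança",
--     "Nova Vitória", "Novo Horizonte", "Parafuso", "Parque Florestal",
--     "Parque das Mangabas", "Parque Verde", "Parque Verde II",
--     "Phoc I", "Phoc II", "Phoc III", "Piaçaveira",
--     "Ponto Certo", "Pólo Petroquímico", "Polo Industrial",
--     "Real Park", "Reserva Camassary", "Santo Amaro de Ipitanga",
--     "Santo Antônio", "São Bento", "São Tomé de Paripe",
--     "Simões Filho", "Stela Mares", "Sucuiu", "Vila Camaçari",
--     "Vila de Abrantes", "Vila Rica",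
-- ]
--
--
-- def _normalize_bairro(bairro: str) -> str:
--     """Normaliza nome de bairro: one pass, exact match wins, first partial kept as fallback."""
--     if not bairro:
--         return bairro
--
--     bairro = bairro.strip()
--     bairro_lower = bairro.lower()
--
--     candidate = None
--     for b in BAIRROS_CAMACARI:
--         b_low = b.lower()
--         if b_low == bairro_lower:
--             return b  # exact match always wins
--         if candidate is None and (b_low in bairro_lower or bairro_lower in b_low):
--             candidate = b  # remember FIRST partial match only
--     return candidate if candidate is not None else bairro
-- ===== Notes on version B (the rewrite author's own statement) =====
-- stated objective: faster
-- what changed: Replaces A's two sequential scans (exact pass, then partial pass) by a single scan that returns immediately on an exact match and records only the first partial match as a fallback, lowering the input once before the loop instead of recomputing bairro.lower() on every comparison.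
import Mathlib
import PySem

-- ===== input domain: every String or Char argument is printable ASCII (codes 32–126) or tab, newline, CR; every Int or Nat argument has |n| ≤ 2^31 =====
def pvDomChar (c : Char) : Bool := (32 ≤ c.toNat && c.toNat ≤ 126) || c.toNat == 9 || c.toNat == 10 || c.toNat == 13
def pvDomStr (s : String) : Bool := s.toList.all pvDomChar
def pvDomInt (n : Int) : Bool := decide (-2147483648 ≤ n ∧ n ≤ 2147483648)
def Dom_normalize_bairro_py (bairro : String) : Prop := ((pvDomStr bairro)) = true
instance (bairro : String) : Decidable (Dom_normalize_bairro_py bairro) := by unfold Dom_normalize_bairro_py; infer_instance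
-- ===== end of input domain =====

-- B replaces A's two sequential scans of the fixed list by one scan keeping the first
-- partial match as a fallback while exact matches return immediately (objective: alternative).

def pvBairros : List String := [
    "Abrantes", "Alto da Bela Vista", "Alto do Cruzeiro", "Arembepe",
    "Barra do Jacuípe", "Buri Satuba", "Caixa d'Água", "Camacari de Dentro",
    "Camaçari de Dentro", "Caminho da Lagoa", "Campo Limpo", "Catu de Abrantes",
    "Centro", "Coqueiro de Abrantes", "Dois de Julho", "Estrada do Côco",
    "Fazenda Mamão", "Gardênia", "Gleba C", "Gleba E", "Gleba H",
    "Gravatá", "Guarajuba", "Imbassaí", "Jambeiro",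
    "Jauá", "Km 32", "Lama Preta", "Limoeiro", "Loteamento Parque Verde",
    "Loteamento Santo Amaro", "Monte Gordo", "Nova Aliança", "Nova Esperança",
    "Nova Vitória", "Novo Horizonte", "Parafuso", "Parque Florestal",
    "Parque das Mangabas", "Parque Verde", "Parque Verde II",
    "Phoc I", "Phoc II", "Phoc III", "Piaçaveira",
    "Ponto Certo", "Pólo Petroquímico", "Polo Industrial",
    "Real Park", "Reserva Camassary", "Santo Amaro de Ipitanga",
    "Santo Antônio", "São Bento", "São Tomé de Paripe",
    "Simões Filho", "Stela Mares", "Sucuiu", "Vila Camaçari",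
    "Vila de Abrantes", "Vila Rica"]

-- ===== PORT A =====
-- A's first loop: 'for b in BAIRROS_CAMACARI: if b.lower() == bairro.lower(): return b'
def pvLoopExact (bairro : String) : List String → Option String
  | [] => none
  | b :: bs =>
    if PySem.Str.lower b = PySem.Str.lower bairro then some b else pvLoopExact bairro bs

-- A's second loop: 'if b.lower() in bairro.lower() or bairro.lower() in b.lower(): return b'
def pvLoopPartial (bairro : String) : List String → Option String
  | [] => none
  | b :: bs =>
    if PySem.Str.isIn (PySem.Str.lower b) (PySem.Str.lower bairro)
        || PySem.Str.isIn (PySem.Str.lower bairro) (PySem.Str.lower b) then some b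
    else pvLoopPartial bairro bs

def normalize_bairro_py (bairro : String) : String :=
  if bairro = "" then bairro
  else
    let bairro := PySem.Str.strip bairro
    match pvLoopExact bairro pvBairros with
    | some b => b
    | none =>
      match pvLoopPartial bairro pvBairros with
      | some b => b
      | none => bairro

-- ===== PORT B =====
-- B's single loop: exact match returns at once; first partial match stored in 'candidate'.
def pvAltLoop (bairro_lower : String) (candidate : Option String) : List String → Option String
  | [] => candidate
  | b :: bs =>
    let b_low := PySem.Str.lower b
    if b_low = bairro_lower then some b
    else
      pvAltLoop bairro_lower
        (if candidate.isNone
            && (PySem.Str.isIn b_low bairro_lower || PySem.Str.isIn bairro_lower b_low)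
         then some b else candidate) bs

def normalize_bairro_py_alt (bairro : String) : String :=
  if bairro = "" then bairro
  else
    let bairro := PySem.Str.strip bairro
    let bairro_lower := PySem.Str.lower bairro
    match pvAltLoop bairro_lower none pvBairros with
    | some b => b
    | none => bairro

-- ===== PRECONDITION & SPEC =====
def Spec_normalize_bairro_py (bairro : String) (out : String) : Prop := out = normalize_bairro_py_alt bairro
instance (bairro : String) (out : String) : Decidable (Spec_normalize_bairro_py bairro out) := by unfold Spec_normalize_bairro_py; infer_instance

-- ===== CLAIM (what is proved, stated in full; the proofs are below) =====
def Claim_equal_normalize_bairro_py : Prop := ∀ (bairro : String), Dom_normalize_bairro_py bairro → Spec_normalize_bairro_py bairro (normalize_bairro_py bairro)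

-- ===== LEMMAS AND PROOFS =====

-- Once the candidate is set, the rest of B's loop only looks for an exact match.
theorem pvAltLoop_some (s x : String) (L : List String) :
    pvAltLoop (PySem.Str.lower s) (some x) L = (pvLoopExact s L).or (some x) := by
  induction L with
  | nil => rfl
  | cons b bs ih =>
    by_cases h : PySem.Str.lower b = PySem.Str.lower s
    · simp [pvAltLoop, pvLoopExact, h]
    · simp [pvAltLoop, pvLoopExact, h, ih]

-- B's loop from an empty candidate computes A's exact scan, falling back to A's partial scan.
theorem pvAltLoop_none (s : String) (L : List String) :
    pvAltLoop (PySem.Str.lower s) none L = (pvLoopExact s L).or (pvLoopPartial s L) := by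
  induction L with
  | nil => rfl
  | cons b bs ih =>
    by_cases h1 : PySem.Str.lower b = PySem.Str.lower s
    · simp [pvAltLoop, pvLoopExact, h1]
    · by_cases h2 : PySem.Chars.isIn (PySem.Chars.lower b.toList) (PySem.Chars.lower s.toList) = true
          ∨ PySem.Chars.isIn (PySem.Chars.lower s.toList) (PySem.Chars.lower b.toList) = true
      · simp only [pvAltLoop, pvLoopExact, pvLoopPartial]
        simp [h1, if_pos h2, pvAltLoop_some]
      · simp only [pvAltLoop, pvLoopExact, pvLoopPartial]
        simp [h1, if_neg h2, ih]

-- ===== VERDICT (by name: the statement is the Claim_ definition above) =====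
theorem normalize_bairro_py_spec : Claim_equal_normalize_bairro_py := by
  intro bairro _
  unfold Spec_normalize_bairro_py normalize_bairro_py normalize_bairro_py_alt
  by_cases h : bairro = ""
  · simp [h]
  · simp only [if_neg h]
    rw [pvAltLoop_none]
    cases hE : pvLoopExact (PySem.Str.strip bairro) pvBairros with
    | some b => simp [Option.or]
    | none =>
      cases hP : pvLoopPartial (PySem.Str.strip bairro) pvBairros with
      | some b => simp [Option.or]
      | none => simp [Option.or]
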